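-- pv_equiv track=rewrite | github.com/Computamos/Guias-TDA | guia1/codigo.py | cazadorDeFalsos
-- ===== SOURCE A (Python) =====
-- def conjuncionSubmatriz(
--         i_0: int, i_1: int, j_0: int, j_1: int, matriz: list[list[bool]]
-- ) -> bool:
--
--     for i in range(i_0, i_1):
--         for j in range(j_0, j_1):
--             if not matriz[i][j]: # if matriz[i][j] == False
--                 return False
--
--     return True
--
-- def cazadorDeFalsos(
--         i_0: int, i_1: int, j_0: int, j_1: int, matriz: list[list[bool]]
-- ) -> tuple[int, int]:
--
--     # Conquer
--     if i_1 - i_0 == 1 and j_1 - j_0 == 1: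
--         if not matriz[i_0][j_0]: # if matriz[i_0][j_0] == False
--             return (i_0, j_0)
--         return None
--
--     # Divide
--     mitad_filas: int = (i_1 + i_0) // 2
--     mitad_columnas: int = (j_1 + j_0) // 2
--
--     mitades = (
--         (i_0, mitad_filas, j_0, mitad_columnas),
--         (mitad_filas, i_1, j_0, mitad_columnas),
--         (i_0, mitad_filas, mitad_columnas, j_1),
--         (mitad_filas, i_1, mitad_columnas, j_1),
--     )
--
--     # Combine
--     for mitad in mitades:
--         i, i_, j, j_ = mitad
--         if not conjuncionSubmatriz(i, i_, j, j_, matriz):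
--             return cazadorDeFalsos(i, i_, j, j_, matriz)
-- ===== SOURCE B (Python) =====
-- def cazadorDeFalsos(i_0, i_1, j_0, j_1, matriz):
--     # Iterative quadtree descent: same quadrant order and tie-break as the
--     # recursive original, but with mutable region bounds and a while loop.
--     while not (i_1 - i_0 == 1 and j_1 - j_0 == 1):
--         mitad_filas = (i_1 + i_0) // 2
--         mitad_columnas = (j_1 + j_0) // 2
--         cuadrantes = [
--             (i_0, mitad_filas, j_0, mitad_columnas),
--             (mitad_filas, i_1, j_0, mitad_columnas),
--             (i_0, mitad_filas, mitad_columnas, j_1),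
--             (mitad_filas, i_1, mitad_columnas, j_1),
--         ]
--         elegido = next(
--             (c for c in cuadrantes
--              if any(not matriz[i][j]
--                     for i in range(c[0], c[1]) for j in range(c[2], c[3]))),
--             None)
--         if elegido is None:
--             return None
--         i_0, i_1, j_0, j_1 = elegido
--     return None if matriz[i_0][j_0] else (i_0, j_0)
-- ===== Notes on version B (the rewrite author's own statement) =====
-- stated objective: alternative
-- what changed: The tail-recursive quadtree descent plus the separate conjuncionSubmatriz helper is replaced by an iterative while loop over mutable region bounds that picks the first False-containing quadrant with next()/any() generator expressions, preserving the exact quadrant order and tie-break.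
-- outside the precondition, e.g. on cazadorDeFalsos(0, 1, 0, 2, [[False]]): A returns (0, 0), B returns (0, 0)
import Mathlib
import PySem

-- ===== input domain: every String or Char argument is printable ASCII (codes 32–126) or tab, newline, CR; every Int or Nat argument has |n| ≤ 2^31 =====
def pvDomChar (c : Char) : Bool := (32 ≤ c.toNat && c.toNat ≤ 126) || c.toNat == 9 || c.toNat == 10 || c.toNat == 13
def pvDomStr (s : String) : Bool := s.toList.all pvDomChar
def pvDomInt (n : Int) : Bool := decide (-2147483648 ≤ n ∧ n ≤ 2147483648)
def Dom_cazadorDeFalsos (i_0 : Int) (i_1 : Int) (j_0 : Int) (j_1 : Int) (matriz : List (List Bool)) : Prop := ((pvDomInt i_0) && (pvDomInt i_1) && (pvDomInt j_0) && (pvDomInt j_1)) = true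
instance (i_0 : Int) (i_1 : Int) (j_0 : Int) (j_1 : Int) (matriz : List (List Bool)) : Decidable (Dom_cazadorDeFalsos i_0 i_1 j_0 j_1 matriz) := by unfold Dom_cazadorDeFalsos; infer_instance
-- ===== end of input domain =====

-- B replaces the tail recursion (with its separate conjuncionSubmatriz helper) by an
-- iterative descent over mutable region bounds, selecting the first False-containing
-- quadrant with find-first/any scans; same quadrant order and tie-break (objective:
-- alternative decomposition, same cost).


-- matriz[i][j]   (Python negative-index wraparound via pyGet?; the 'true' default is
-- only reachable outside Pre_, where Python raises IndexError)
def pvCell (matriz : List (List Bool)) (i j : Int) : Bool :=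
  ((PySem.List.pyGet? matriz i).bind (fun r => PySem.List.pyGet? r j)).getD true

-- ===== PORT A =====
-- inner 'for j in range(j_0, j_1)' of conjuncionSubmatriz
def pvConjCols (matriz : List (List Bool)) (i : Int) : List Int → Bool
  | [] => true
  | j :: js => if !(pvCell matriz i j) then false else pvConjCols matriz i js

-- outer 'for i in range(i_0, i_1)' of conjuncionSubmatriz (the inner 'return False' propagates out)
def pvConjRows (matriz : List (List Bool)) (j_0 j_1 : Int) : List Int → Bool
  | [] => true
  | i :: is =>
    if !(pvConjCols matriz i (PySem.List.pyRange j_0 j_1 1)) then false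
    else pvConjRows matriz j_0 j_1 is

def conjuncionSubmatriz (i_0 i_1 j_0 j_1 : Int) (matriz : List (List Bool)) : Bool :=
  pvConjRows matriz j_0 j_1 (PySem.List.pyRange i_0 i_1 1)

-- A's recursion with a fuel guard for structural totality; the fuel never runs out in
-- practice, since each recursive call enters a nonempty quadrant whose row+column span
-- sum is strictly smaller.
def pvGoA (matriz : List (List Bool)) : Nat → Int → Int → Int → Int → Option (Int × Int)
  | 0, _, _, _, _ => none
  | f + 1, i_0, i_1, j_0, j_1 =>
    if i_1 - i_0 = 1 ∧ j_1 - j_0 = 1 then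
      if !(pvCell matriz i_0 j_0) then some (i_0, j_0) else none
    else
      let mitad_filas := PySem.Int.floordiv (i_1 + i_0) 2
      let mitad_columnas := PySem.Int.floordiv (j_1 + j_0) 2
      if !(conjuncionSubmatriz i_0 mitad_filas j_0 mitad_columnas matriz) then
        pvGoA matriz f i_0 mitad_filas j_0 mitad_columnas
      else if !(conjuncionSubmatriz mitad_filas i_1 j_0 mitad_columnas matriz) then
        pvGoA matriz f mitad_filas i_1 j_0 mitad_columnas
      else if !(conjuncionSubmatriz i_0 mitad_filas mitad_columnas j_1 matriz) then
        pvGoA matriz f i_0 mitad_filas mitad_columnas j_1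
      else if !(conjuncionSubmatriz mitad_filas i_1 mitad_columnas j_1 matriz) then
        pvGoA matriz f mitad_filas i_1 mitad_columnas j_1
      else none

def cazadorDeFalsos (i_0 : Int) (i_1 : Int) (j_0 : Int) (j_1 : Int) (matriz : List (List Bool)) : Option (Int × Int) :=
  pvGoA matriz ((i_1 - i_0).toNat + (j_1 - j_0).toNat + 1) i_0 i_1 j_0 j_1

-- ===== PORT B =====
-- 'any(not matriz[i][j] for i in range(a, b) for j in range(c, d))'
def pvHayFalso (a b c d : Int) (matriz : List (List Bool)) : Bool :=
  (PySem.List.pyRange a b 1).any (fun i =>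
    (PySem.List.pyRange c d 1).any (fun j => !(pvCell matriz i j)))

-- B's while loop over the mutable bounds, with the same fuel guard for totality
def pvGoB (matriz : List (List Bool)) : Nat → Int → Int → Int → Int → Option (Int × Int)
  | 0, _, _, _, _ => none
  | f + 1, i_0, i_1, j_0, j_1 =>
    if i_1 - i_0 = 1 ∧ j_1 - j_0 = 1 then
      if pvCell matriz i_0 j_0 then none else some (i_0, j_0)
    else
      let mf := PySem.Int.floordiv (i_1 + i_0) 2
      let mc := PySem.Int.floordiv (j_1 + j_0) 2
      match [(i_0, mf, j_0, mc), (mf, i_1, j_0, mc), (i_0, mf, mc, j_1), (mf, i_1, mc, j_1)].find?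
          (fun c => pvHayFalso c.1 c.2.1 c.2.2.1 c.2.2.2 matriz) with
      | none => none
      | some c => pvGoB matriz f c.1 c.2.1 c.2.2.1 c.2.2.2

def cazadorDeFalsos_alt (i_0 : Int) (i_1 : Int) (j_0 : Int) (j_1 : Int) (matriz : List (List Bool)) : Option (Int × Int) :=
  pvGoB matriz ((i_1 - i_0).toNat + (j_1 - j_0).toNat + 1) i_0 i_1 j_0 j_1

-- ===== PRECONDITION & SPEC =====
-- Pre_ requires every cell of the scanned rectangle [i_0,i_1) × [j_0,j_1) to be a valid
-- (possibly negative, Python-wrapped) index; this is where Python never raises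
-- IndexError.  It is slightly narrower than "A returns": A may return early on a False
-- found before ever touching an out-of-range cell; those early-return inputs are
-- excluded (B behaves identically on them anyway).
def Pre_cazadorDeFalsos (i_0 : Int) (i_1 : Int) (j_0 : Int) (j_1 : Int) (matriz : List (List Bool)) : Prop :=
  i_0 < i_1 → j_0 < j_1 →
    (-(matriz.length : Int) ≤ i_0 ∧ i_1 ≤ (matriz.length : Int) ∧
      ∀ p ∈ matriz.zipIdx,
        ((i_0 ≤ (p.2 : Int) ∧ (p.2 : Int) < i_1) ∨
         (i_0 ≤ (p.2 : Int) - matriz.length ∧ (p.2 : Int) - (matriz.length : Int) < i_1)) →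
        (-(p.1.length : Int) ≤ j_0 ∧ j_1 ≤ (p.1.length : Int)))
instance (i_0 : Int) (i_1 : Int) (j_0 : Int) (j_1 : Int) (matriz : List (List Bool)) : Decidable (Pre_cazadorDeFalsos i_0 i_1 j_0 j_1 matriz) := by unfold Pre_cazadorDeFalsos; infer_instance

def pvWitness_cazadorDeFalsos : Int × Int × Int × Int × List (List Bool) :=
  (0, 2, 0, 2, [[true, false], [true, true]])

def Spec_cazadorDeFalsos (i_0 : Int) (i_1 : Int) (j_0 : Int) (j_1 : Int) (matriz : List (List Bool)) (out : Option (Int × Int)) : Prop := out = cazadorDeFalsos_alt i_0 i_1 j_0 j_1 matriz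
instance (i_0 : Int) (i_1 : Int) (j_0 : Int) (j_1 : Int) (matriz : List (List Bool)) (out : Option (Int × Int)) : Decidable (Spec_cazadorDeFalsos i_0 i_1 j_0 j_1 matriz out) := by unfold Spec_cazadorDeFalsos; infer_instance

-- ===== CLAIM (what is proved, stated in full; the proofs are below) =====
def Claim_equal_cazadorDeFalsos : Prop := ∀ (i_0 : Int) (i_1 : Int) (j_0 : Int) (j_1 : Int) (matriz : List (List Bool)), Dom_cazadorDeFalsos i_0 i_1 j_0 j_1 matriz → Pre_cazadorDeFalsos i_0 i_1 j_0 j_1 matriz → Spec_cazadorDeFalsos i_0 i_1 j_0 j_1 matriz (cazadorDeFalsos i_0 i_1 j_0 j_1 matriz)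

-- ===== LEMMAS AND PROOFS =====
theorem pvConjCols_eq_all (matriz : List (List Bool)) (i : Int) (js : List Int) :
    pvConjCols matriz i js = js.all (fun j => pvCell matriz i j) := by
  induction js with
  | nil => rfl
  | cons j js ih => cases h : pvCell matriz i j <;> simp [pvConjCols, h, ih]

theorem pvConjRows_eq_all (matriz : List (List Bool)) (j_0 j_1 : Int) (is : List Int) :
    pvConjRows matriz j_0 j_1 is
      = is.all (fun i => (PySem.List.pyRange j_0 j_1 1).all (fun j => pvCell matriz i j)) := by
  induction is with
  | nil => rfl
  | cons i is ih =>
    cases h : pvConjCols matriz i (PySem.List.pyRange j_0 j_1 1) <;>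
      simp [pvConjRows, h, ih, ← pvConjCols_eq_all]

theorem conj_eq_not_hay (a b c d : Int) (matriz : List (List Bool)) :
    conjuncionSubmatriz a b c d matriz = !(pvHayFalso a b c d matriz) := by
  simp [conjuncionSubmatriz, pvHayFalso, pvConjRows_eq_all, List.all_eq_not_any_not]

theorem pvGoA_eq_pvGoB (matriz : List (List Bool)) (fuel : Nat) :
    ∀ i_0 i_1 j_0 j_1 : Int,
      pvGoA matriz fuel i_0 i_1 j_0 j_1 = pvGoB matriz fuel i_0 i_1 j_0 j_1 := by
  induction fuel with
  | zero => intro _ _ _ _; rfl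
  | succ f ih =>
    intro i_0 i_1 j_0 j_1
    simp only [pvGoA, pvGoB, conj_eq_not_hay, Bool.not_not]
    by_cases hb : i_1 - i_0 = 1 ∧ j_1 - j_0 = 1
    · simp only [if_pos hb]
      cases h : pvCell matriz i_0 j_0 <;> simp [h]
    · simp only [if_neg hb]
      set mf := PySem.Int.floordiv (i_1 + i_0) 2 with hmf
      set mc := PySem.Int.floordiv (j_1 + j_0) 2 with hmc
      by_cases h1 : pvHayFalso i_0 mf j_0 mc matriz = true
      · simp [List.find?, h1, ih]
      · by_cases h2 : pvHayFalso mf i_1 j_0 mc matriz = true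
        · simp [List.find?, h1, h2, ih]
        · by_cases h3 : pvHayFalso i_0 mf mc j_1 matriz = true
          · simp [List.find?, h1, h2, h3, ih]
          · by_cases h4 : pvHayFalso mf i_1 mc j_1 matriz = true
            · simp [List.find?, h1, h2, h3, h4, ih]
            · simp [List.find?, h1, h2, h3, h4]

-- ===== VERDICT (by name: the statement is the Claim_ definition above) =====
theorem cazadorDeFalsos_spec : Claim_equal_cazadorDeFalsos := by
  intro i_0 i_1 j_0 j_1 matriz _ _
  unfold Spec_cazadorDeFalsos cazadorDeFalsos cazadorDeFalsos_alt
  exact pvGoA_eq_pvGoB matriz _ i_0 i_1 j_0 j_1
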